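-- pv_equiv track=rewrite | github.com/josiahadrineda/Daily-Coding-Problems | 246_WordCircle.py | word_circle
-- ===== SOURCE A (Python) =====
-- def word_circle(words):
--     """Given a list of words WORDS, determines whether the words
--     can be rearranged to form a circle. A word X can "connect" to
--     another word Y if the last letter of X is the same as the first
--     letter of Y.
--
--     >>> word_circle(['chair', 'height', 'racket', 'touch', 'tunic'])
--     True
--     >>> word_circle(['chair', 'height', 'racket', 'touch'])
--     False
--     """
--     assert words, 'WORDS cannot be an empty list.'
--
--     def word_circle_backtrack(words, curr):
--         if not words:
--             return len(curr) > 1 and curr[0][0] == curr[-1][-1]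
--         else:
--             for i, word in enumerate(list(words)):
--                 if is_valid(word, curr):
--                     words.remove(word)
--                     if word_circle_backtrack(words, curr + [word]):
--                         return True
--                     words.insert(i, word)
--             return False
--
--     def is_valid(word, curr):
--         return not curr or curr[-1][-1] == word[0]
--
--     return word_circle_backtrack(words, [])
-- ===== SOURCE B (Python) =====
-- def word_circle(words):
--     n = len(words)
--     if n < 2:
--         return False
--     firsts = [w[0] for w in words]
--     lasts = [w[-1] for w in words]
--     # Eulerian-circuit check on the letter graph (each word = edge first->last):
--     # per-letter in/out degree balance ...
--     net = {}
--     for a in firsts: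
--         net[a] = net.get(a, 0) + 1
--     for b in lasts:
--         net[b] = net.get(b, 0) - 1
--     if any(v != 0 for v in net.values()):
--         return False
--     # ... plus weak connectivity of all edges to the first word's letter:
--     # grow the reachable set until it stabilises (undirected reachability).
--     seen = {firsts[0]}
--     for _ in range(2 * n):
--         new = set(seen)
--         for a, b in zip(firsts, lasts):
--             if a in new or b in new:
--                 new.add(a)
--                 new.add(b)
--         if new == seen:
--             break
--         seen = new
--     return all(a in seen for a in firsts)
-- ===== Notes on version B (the rewrite author's own statement) =====
-- stated objective: faster
-- what changed: Replaced the factorial-time backtracking search over word orderings by the Eulerian-circuit criterion on the letter graph: per-letter first/last degree balance plus connectivity of all words' letters to the first word's starting letter; intended as asymptotically faster (measured 20.61x at n=16, the largest size where A finishes; A times out at n=64 where B still returns, so a timing run could not confirm a ratio at the largest size).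
import Mathlib
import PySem

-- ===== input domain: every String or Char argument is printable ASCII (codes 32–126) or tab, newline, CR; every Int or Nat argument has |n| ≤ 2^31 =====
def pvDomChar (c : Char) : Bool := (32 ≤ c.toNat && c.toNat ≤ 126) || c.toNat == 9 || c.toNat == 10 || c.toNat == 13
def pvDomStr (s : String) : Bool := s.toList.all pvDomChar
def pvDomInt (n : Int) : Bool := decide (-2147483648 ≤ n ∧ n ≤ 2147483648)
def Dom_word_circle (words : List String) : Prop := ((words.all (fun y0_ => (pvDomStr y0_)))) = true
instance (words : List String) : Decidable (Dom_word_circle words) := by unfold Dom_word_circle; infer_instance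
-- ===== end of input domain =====

-- B replaces A's factorial backtracking over orderings by an Eulerian-circuit check (letter degree
-- balance + connectivity); equivalence is about the RETURN value only (A empties its argument list
-- in place when it returns True, B does not mutate it).

-- w[0] / w[-1] as total functions (Pre_ guarantees the words indexed are nonempty)
def wcF (w : String) : Char := (PySem.Str.pyGet? w 0).getD ' '
def wcL (w : String) : Char := (PySem.Str.pyGet? w (-1)).getD ' '

-- ===== PORT A =====
def wcIsValid (word : String) (curr : List String) : Bool :=
  decide (curr = []) || (wcL (PySem.List.pyGetD curr (-1) "") == wcF word)

theorem wc_remove?_length {xs ys : List String} {v : String}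
    (h : PySem.List.remove? xs v = some ys) : ys.length + 1 = xs.length := by
  have hv : v ∈ xs := by
    by_contra hv
    rw [(PySem.List.remove?_eq_none_iff xs v).mpr hv] at h
    cases h
  rw [PySem.List.remove?_eq_some_erase xs v hv] at h
  cases h
  have h1 := List.length_erase_of_mem hv
  have h2 : 1 ≤ xs.length := List.length_pos_of_mem hv
  omega

mutual
def wcBt (ws curr : List String) : Bool :=
  if ws = [] then
    decide (1 < curr.length) &&
      (wcF (PySem.List.pyGetD curr 0 "") == wcL (PySem.List.pyGetD curr (-1) ""))
  else wcGo (PySem.List.enumerate ws 0) ws curr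
termination_by (ws.length, ws.length + 1)
decreasing_by
  simp only [PySem.List.length_enumerate]
  exact Prod.Lex.right _ (Nat.lt_succ_self _)

def wcGo (todo : List (Int × String)) (ws curr : List String) : Bool :=
  match todo with
  | [] => false
  | (i, word) :: rest =>
    if wcIsValid word curr then
      match h : PySem.List.remove? ws word with
      | none => false
      | some ws' =>
        if wcBt ws' (curr ++ [word]) then true
        else wcGo rest (PySem.List.insert ws' i word) curr
    else wcGo rest ws curr
termination_by (ws.length, todo.length)
decreasing_by
  · exact Prod.Lex.left _ _ (by have := wc_remove?_length h; omega)
  · rw [PySem.List.length_insert]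
    have := wc_remove?_length h
    rw [this]
    exact Prod.Lex.right _ (by simp)
  · exact Prod.Lex.right _ (by simp)
end

def word_circle (words : List String) : Bool := wcBt words []

-- ===== PORT B =====
def word_circle_alt (words : List String) : Bool :=
  let n : Int := PySem.List.len words
  if n < 2 then false
  else
    let firsts : List Char := words.map (fun w => (PySem.Str.pyGet? w 0).getD ' ')
    let lasts : List Char := words.map (fun w => (PySem.Str.pyGet? w (-1)).getD ' ')
    let net : PySem.Dict Char Int :=
      lasts.foldl (fun d b => d.insert b (d.getD b 0 - 1))
        (firsts.foldl (fun d a => d.insert a (d.getD a 0 + 1)) PySem.Dict.empty)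
    if (PySem.Dict.values net).any (fun v => v != 0) then false
    else
      let res : PySem.Set Char × Bool :=
        (PySem.List.pyRange 0 (2 * n) 1).foldl
          (fun st _ =>
            if st.2 then st
            else
              let new : PySem.Set Char :=
                (firsts.zip lasts).foldl
                  (fun nw ab =>
                    if PySem.Set.contains nw ab.1 || PySem.Set.contains nw ab.2 then
                      PySem.Set.add (PySem.Set.add nw ab.1) ab.2
                    else nw)
                  (PySem.Set.ofList st.1)
              if PySem.Set.equal new st.1 then (st.1, true) else (new, false))
          (PySem.Set.add PySem.Set.empty (PySem.List.pyGetD firsts 0 ' '), false)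
      firsts.all (fun a => PySem.Set.contains res.1 a)

-- ===== PRECONDITION & SPEC =====
-- Pre_ excludes exactly the inputs where A raises: the empty list (assert) and any list of two or
-- more words containing the empty word "" (is_valid / the final circle test index into "" — IndexError).
def Pre_word_circle (words : List String) : Prop :=
  words ≠ [] ∧ (2 ≤ words.length → ∀ w ∈ words, w ≠ "")
instance (words : List String) : Decidable (Pre_word_circle words) := by
  unfold Pre_word_circle; infer_instance

def pvWitness_word_circle : List String := ["ab", "ba"]

def Spec_word_circle (words : List String) (out : Bool) : Prop := out = word_circle_alt words
instance (words : List String) (out : Bool) : Decidable (Spec_word_circle words out) := by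
  unfold Spec_word_circle; infer_instance

-- ===== CLAIM (what is proved, stated in full; the proofs are below) =====
def Claim_equal_word_circle : Prop :=
  ∀ (words : List String), Dom_word_circle words → Pre_word_circle words →
    Spec_word_circle words (word_circle words)

-- ===== LEMMAS AND PROOFS =====

-- ---------- shared spec: "the words can be arranged in a connecting circle" ----------
def RW (a b : String) : Prop := wcL a = wcF b

def GoodCirc (l : List String) : Prop :=
  List.IsChain RW l ∧ 2 ≤ l.length ∧ l.getLast?.map wcL = l.head?.map wcF

def CanCircle (ws : List String) : Prop := ∃ l, l.Perm ws ∧ GoodCirc l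

-- ---------- A-side: the backtracking search decides CanCircle ----------
theorem wc_insert_perm (xs : List String) (i : Int) (v : String) :
    (PySem.List.insert xs i v).Perm (v :: xs) := by
  unfold PySem.List.insert
  rcases h : PySem.List.sliceIndices xs.length (some i) none 1 with ⟨k, a, b⟩
  simpa using (List.perm_middle (a := v) (l₁ := List.take k.toNat xs) (l₂ := List.drop k.toNat xs)).trans
    (by rw [List.take_append_drop])

theorem wc_valid_iff (word : String) (curr : List String) (hch : List.IsChain RW curr) :
    (wcIsValid word curr = true ↔ List.IsChain RW (curr ++ [word])) := by
  rw [List.isChain_append]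
  unfold wcIsValid
  rcases eq_or_ne curr [] with h | h
  · subst h; simp
  · have hlast : curr.getLast? = some (curr.getLast h) := List.getLast?_eq_getLast h
    simp [h, PySem.List.pyGetD_neg_one curr "" h, hlast, hch, RW]

theorem wc_bt_iff : ∀ (n : Nat) (ws : List String), ws.length = n →
    ∀ curr, List.IsChain RW curr →
    (wcBt ws curr = true ↔ ∃ l, l.Perm ws ∧ GoodCirc (curr ++ l)) := by
  intro n
  induction n using Nat.strong_induction_on with
  | _ n IH =>
    intro ws hn curr hch
    by_cases hws : ws = []
    · subst hws
      rw [wcBt, if_pos rfl]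
      have hbase : (decide (1 < curr.length) &&
          (wcF (PySem.List.pyGetD curr 0 "") == wcL (PySem.List.pyGetD curr (-1) ""))) = true
          ↔ GoodCirc curr := by
        rcases eq_or_ne curr [] with hc | hc
        · subst hc
          constructor
          · intro h
            rw [show (decide (1 < ([] : List String).length)) = false from rfl,
              Bool.false_and] at h
            cases h
          · rintro ⟨_, h2, _⟩
            simp at h2
        · have hlast : curr.getLast? = some (curr.getLast hc) := List.getLast?_eq_some_getLast hc
          have hhead : curr.head? = some (curr.head hc) := List.head?_eq_some_head hc
          have h0 : PySem.List.pyGetD curr 0 "" = curr.head hc := by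
            rw [PySem.List.pyGetD_zero]
            cases curr with
            | nil => exact absurd rfl hc
            | cons x t => rfl
          rw [PySem.List.pyGetD_neg_one curr "" hc, h0]
          unfold GoodCirc
          rw [hlast, hhead]
          constructor
          · intro h
            rcases (Bool.and_eq_true _ _).mp h with ⟨h1, h2⟩
            refine ⟨hch, by have := of_decide_eq_true h1; omega, ?_⟩
            simp only [Option.map_some]
            exact congrArg some (beq_iff_eq.mp h2).symm
          · rintro ⟨_, h2, h3⟩
            apply (Bool.and_eq_true _ _).mpr
            refine ⟨decide_eq_true (by omega), ?_⟩
            simp only [Option.map_some, Option.some.injEq] at h3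
            exact beq_iff_eq.mpr h3.symm
      rw [hbase]
      constructor
      · intro h; exact ⟨[], List.Perm.refl _, by simpa using h⟩
      · rintro ⟨l, hl, hg⟩
        have : l = [] := List.Perm.eq_nil hl
        subst this; simpa using hg
    · rw [wcBt, if_neg hws]
      have hlen : ws.length = n := hn
      -- inner loop characterisation
      have go_iff : ∀ todo (ws2 : List String), ws2.Perm ws → (∀ p ∈ todo, p.2 ∈ ws2) →
          (wcGo todo ws2 curr = true ↔ ∃ p ∈ todo, wcIsValid p.2 curr = true ∧
            ∃ l, l.Perm (ws.erase p.2) ∧ GoodCirc (curr ++ p.2 :: l)) := by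
        intro todo
        induction todo with
        | nil => intro ws2 _ _; rw [wcGo]; simp
        | cons hd rest IHt =>
          rcases hd with ⟨i, word⟩
          intro ws2 hperm hmem
          have hw : word ∈ ws2 := hmem (i, word) (List.mem_cons_self)
          have hrest : ∀ p ∈ rest, p.2 ∈ ws2 := fun p hp => hmem p (List.mem_cons_of_mem _ hp)
          by_cases hv : wcIsValid word curr = true
          · have hrem : PySem.List.remove? ws2 word = some (ws2.erase word) :=
              PySem.List.remove?_eq_some_erase ws2 word hw
            have hchw : List.IsChain RW (curr ++ [word]) := (wc_valid_iff word curr hch).mp hv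
            have hlen2 : ws2.length = n := hperm.length_eq.trans hlen
            have hlene : (ws2.erase word).length = n - 1 := by
              rw [List.length_erase_of_mem hw, hlen2]
            have hlt : n - 1 < n := by
              have : 1 ≤ ws2.length := List.length_pos_of_mem hw
              omega
            have hbt := IH (n-1) hlt (ws2.erase word) hlene (curr ++ [word]) hchw
            have herase : (ws2.erase word).Perm (ws.erase word) := hperm.erase word
            have hbt' : wcBt (ws2.erase word) (curr ++ [word]) = true ↔
                ∃ l, l.Perm (ws.erase word) ∧ GoodCirc (curr ++ word :: l) := by
              rw [hbt]
              constructor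
              · rintro ⟨l, hl, hg⟩
                exact ⟨l, hl.trans herase, by simpa using hg⟩
              · rintro ⟨l, hl, hg⟩
                exact ⟨l, hl.trans herase.symm, by simpa using hg⟩
            rw [wcGo]
            simp only [hv, if_true]
            have hstep : (match h : PySem.List.remove? ws2 word with
                | none => false
                | some ws' =>
                  if wcBt ws' (curr ++ [word]) = true then true
                  else wcGo rest (PySem.List.insert ws' i word) curr) =
                (if wcBt (ws2.erase word) (curr ++ [word]) = true then true
                  else wcGo rest (PySem.List.insert (ws2.erase word) i word) curr) := by
              split
              · next heq => rw [hrem] at heq; cases heq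
              · next ws' heq =>
                rw [hrem] at heq
                cases heq
                rfl
            rw [hstep]
            by_cases hb : wcBt (ws2.erase word) (curr ++ [word]) = true
            · rw [if_pos hb]
              constructor
              · intro _
                exact ⟨(i, word), List.mem_cons_self, hv, hbt'.mp hb⟩
              · intro _; rfl
            · rw [if_neg hb]
              have hperm3 : (PySem.List.insert (ws2.erase word) i word).Perm ws :=
                (wc_insert_perm _ i word).trans ((List.perm_cons_erase hw).symm.trans hperm)
              have hmem3 : ∀ p ∈ rest, p.2 ∈ PySem.List.insert (ws2.erase word) i word := by
                intro p hp
                exact hperm3.mem_iff.mpr (hperm.mem_iff.mp (hrest p hp))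
              rw [IHt (PySem.List.insert (ws2.erase word) i word) hperm3 hmem3]
              have hhead : ¬ (∃ l, l.Perm (ws.erase word) ∧ GoodCirc (curr ++ word :: l)) := by
                intro hx
                exact hb (hbt'.mpr hx)
              constructor
              · rintro ⟨p, hp, h1, h2⟩
                exact ⟨p, List.mem_cons_of_mem _ hp, h1, h2⟩
              · rintro ⟨p, hp, h1, h2⟩
                rcases List.mem_cons.mp hp with hpe | hp'
                · exfalso
                  apply hhead
                  have : p.2 = word := by rw [hpe]
                  rw [this] at h2
                  exact h2
                · exact ⟨p, hp', h1, h2⟩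
          · rw [wcGo]
            have hv' : wcIsValid word curr = false := by
              cases h : wcIsValid word curr
              · rfl
              · exact absurd h hv
            simp only [hv', Bool.false_eq_true, if_false]
            rw [IHt ws2 hperm hrest]
            constructor
            · rintro ⟨p, hp, h1, h2⟩
              exact ⟨p, List.mem_cons_of_mem _ hp, h1, h2⟩
            · rintro ⟨p, hp, h1, h2⟩
              rcases List.mem_cons.mp hp with hpe | hp'
              · exfalso
                apply hv
                have : p.2 = word := by rw [hpe]
                rw [this] at h1
                exact h1
              · exact ⟨p, hp', h1, h2⟩
      have hmem0 : ∀ p ∈ PySem.List.enumerate ws 0, p.2 ∈ ws := by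
        intro p hp
        rcases (PySem.List.mem_enumerate_iff ws 0 p).mp hp with ⟨k, hk, rfl⟩
        exact List.getElem_mem hk
      rw [go_iff (PySem.List.enumerate ws 0) ws (List.Perm.refl ws) hmem0]
      constructor
      · rintro ⟨p, hp, hv, l, hl, hg⟩
        refine ⟨p.2 :: l, ?_, hg⟩
        have hpmem : p.2 ∈ ws := hmem0 p hp
        exact (hl.cons p.2).trans (List.perm_cons_erase hpmem).symm
      · rintro ⟨l, hl, hg⟩
        rcases l with _ | ⟨w, l''⟩
        · exfalso
          have := hl.length_eq
          simp at this
          exact hws (List.eq_nil_of_length_eq_zero this.symm)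
        · have hwmem : w ∈ ws := hl.mem_iff.mp List.mem_cons_self
          rcases List.mem_iff_getElem.mp hwmem with ⟨k, hk, hkw⟩
          refine ⟨((k : Int), w), ?_, ?_, l'', ?_, hg⟩
          · exact (PySem.List.mem_enumerate_iff ws 0 _).mpr ⟨k, hk, by simp [hkw]⟩
          · apply (wc_valid_iff w curr hch).mpr
            have : List.IsChain RW ((curr ++ [w]) ++ l'') := by
              simpa using hg.1
            exact (List.isChain_append.mp this).1
          · exact (List.cons_perm_iff_perm_erase.mp hl).2

-- ---------- B-side: Eulerian conditions ----------
def AdjOf (E : List String) (a b : Char) : Prop :=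
  ∃ w ∈ E, (wcF w = a ∧ wcL w = b) ∨ (wcL w = a ∧ wcF w = b)

def WBalanced (E : List String) : Prop :=
  ∀ c : Char, (E.map wcF).count c = (E.map wcL).count c

def StartC (ws : List String) : Char := (ws.map wcF).getD 0 ' '

def ConnTo (E : List String) (r : Char) : Prop :=
  ∀ w ∈ E, Relation.ReflTransGen (AdjOf E) r (wcF w)

theorem adjOf_symm (E : List String) : Symmetric (AdjOf E) := by
  rintro a b ⟨w, hw, h | h⟩
  · exact ⟨w, hw, Or.inr ⟨h.2, h.1⟩⟩
  · exact ⟨w, hw, Or.inl ⟨h.2, h.1⟩⟩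

-- the per-letter net-degree dictionary
theorem wc_getD_foldl_insert_sub_one (l : List Char) (d : PySem.Dict Char Int) (v : Char) :
    (l.foldl (fun d b => d.insert b (d.getD b 0 - 1)) d).getD v 0 = d.getD v 0 - l.count v := by
  induction l generalizing d with
  | nil => simp
  | cons x t IHl =>
    rw [List.foldl_cons, IHl, PySem.Dict.getD_insert]
    by_cases h : v = x
    · subst h
      rw [if_pos rfl, List.count_cons_self]
      push_cast
      ring
    · rw [if_neg h]
      have hc : List.count v (x :: t) = List.count v t := by
        simp [Ne.symm h]
      rw [hc]

-- one relaxation pass over the (first,last) pairs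
def wcStep (nw : PySem.Set Char) (ab : Char × Char) : PySem.Set Char :=
  if PySem.Set.contains nw ab.1 || PySem.Set.contains nw ab.2 then
    PySem.Set.add (PySem.Set.add nw ab.1) ab.2
  else nw

def AdjZ (Z : List (Char × Char)) (a b : Char) : Prop :=
  ∃ ab ∈ Z, (ab.1 = a ∧ ab.2 = b) ∨ (ab.2 = a ∧ ab.1 = b)

theorem wcStep_mono {s : PySem.Set Char} {x : Char} (ab : Char × Char) (h : x ∈ s) :
    x ∈ wcStep s ab := by
  unfold wcStep
  split
  · exact (PySem.Set.mem_add _ _ _).mpr (Or.inl ((PySem.Set.mem_add _ _ _).mpr (Or.inl h)))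
  · exact h

theorem wcStep_fold_mono {Z : List (Char × Char)} {s : PySem.Set Char} {x : Char} (h : x ∈ s) :
    x ∈ Z.foldl wcStep s := by
  induction Z generalizing s with
  | nil => exact h
  | cons ab t IHZ => exact IHZ (wcStep_mono ab h)

theorem wcStep_nodup {s : PySem.Set Char} (ab : Char × Char) (h : s.Nodup) :
    (wcStep s ab).Nodup := by
  unfold wcStep
  split
  · exact PySem.Set.nodup_add _ _ (PySem.Set.nodup_add _ _ h)
  · exact h

theorem wcStep_fold_nodup {Z : List (Char × Char)} {s : PySem.Set Char} (h : s.Nodup) :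
    (Z.foldl wcStep s).Nodup := by
  induction Z generalizing s with
  | nil => exact h
  | cons ab t IHZ => exact IHZ (wcStep_nodup ab h)

theorem wcStep_fold_pool {Z : List (Char × Char)} {s : PySem.Set Char} {x : Char}
    (h : x ∈ Z.foldl wcStep s) : x ∈ s ∨ ∃ ab ∈ Z, x = ab.1 ∨ x = ab.2 := by
  induction Z generalizing s with
  | nil => exact Or.inl h
  | cons ab t IHZ =>
    rcases IHZ h with h1 | ⟨ab', hab', h2⟩
    · unfold wcStep at h1
      split at h1
      · rcases (PySem.Set.mem_add _ _ _).mp h1 with h3 | h3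
        · rcases (PySem.Set.mem_add _ _ _).mp h3 with h4 | h4
          · exact Or.inl h4
          · exact Or.inr ⟨ab, List.mem_cons_self, Or.inl h4⟩
        · exact Or.inr ⟨ab, List.mem_cons_self, Or.inr h3⟩
      · exact Or.inl h1
    · exact Or.inr ⟨ab', List.mem_cons_of_mem _ hab', h2⟩

theorem wcStep_fold_sound {Z Z0 : List (Char × Char)} {s : PySem.Set Char} {r : Char}
    (hZ : ∀ ab ∈ Z, ab ∈ Z0)
    (hs : ∀ y ∈ s, Relation.ReflTransGen (AdjZ Z0) r y) :
    ∀ x ∈ Z.foldl wcStep s, Relation.ReflTransGen (AdjZ Z0) r x := by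
  induction Z generalizing s with
  | nil => exact hs
  | cons ab t IHZ =>
    intro x hx
    refine IHZ (fun p hp => hZ p (List.mem_cons_of_mem _ hp)) ?_ x hx
    intro y hy
    unfold wcStep at hy
    split at hy
    · next hcond =>
      have hab : ab ∈ Z0 := hZ ab List.mem_cons_self
      have h12 : AdjZ Z0 ab.1 ab.2 := ⟨ab, hab, Or.inl ⟨rfl, rfl⟩⟩
      have h21 : AdjZ Z0 ab.2 ab.1 := ⟨ab, hab, Or.inr ⟨rfl, rfl⟩⟩
      have hone : Relation.ReflTransGen (AdjZ Z0) r ab.1 ∧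
          Relation.ReflTransGen (AdjZ Z0) r ab.2 := by
        rcases Bool.or_eq_true_iff.mp hcond with hc | hc
        · have h1 := hs ab.1 ((PySem.Set.contains_iff _ _).mp hc)
          exact ⟨h1, h1.tail h12⟩
        · have h2 := hs ab.2 ((PySem.Set.contains_iff _ _).mp hc)
          exact ⟨h2.tail h21, h2⟩
      rcases (PySem.Set.mem_add _ _ _).mp hy with h3 | h3
      · rcases (PySem.Set.mem_add _ _ _).mp h3 with h4 | h4
        · exact hs y h4
        · rw [h4]; exact hone.1
      · rw [h3]; exact hone.2
    · exact hs y hy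

theorem wcStep_of_mem {s : PySem.Set Char} {ab : Char × Char}
    (h : ab.1 ∈ s ∨ ab.2 ∈ s) : ab.1 ∈ wcStep s ab ∧ ab.2 ∈ wcStep s ab := by
  have hcond : (PySem.Set.contains s ab.1 || PySem.Set.contains s ab.2) = true := by
    rcases h with h | h
    · exact Bool.or_eq_true_iff.mpr (Or.inl ((PySem.Set.contains_iff _ _).mpr h))
    · exact Bool.or_eq_true_iff.mpr (Or.inr ((PySem.Set.contains_iff _ _).mpr h))
  unfold wcStep
  rw [if_pos hcond]
  constructor
  · exact (PySem.Set.mem_add _ _ _).mpr (Or.inl ((PySem.Set.mem_add _ _ _).mpr (Or.inr rfl)))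
  · exact (PySem.Set.mem_add _ _ _).mpr (Or.inr rfl)

theorem wcStep_fold_processed {Z : List (Char × Char)} {s : PySem.Set Char} {ab : Char × Char}
    (hab : ab ∈ Z) (h : ab.1 ∈ s ∨ ab.2 ∈ s) :
    ab.1 ∈ Z.foldl wcStep s ∧ ab.2 ∈ Z.foldl wcStep s := by
  rcases List.append_of_mem hab with ⟨Z1, Z2, rfl⟩
  rw [List.foldl_append, List.foldl_cons]
  have hs1 : ab.1 ∈ Z1.foldl wcStep s ∨ ab.2 ∈ Z1.foldl wcStep s := by
    rcases h with h | h
    · exact Or.inl (wcStep_fold_mono h)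
    · exact Or.inr (wcStep_fold_mono h)
  have hkey := wcStep_of_mem hs1
  exact ⟨wcStep_fold_mono hkey.1, wcStep_fold_mono hkey.2⟩

def wcRound (Z : List (Char × Char)) (st : PySem.Set Char × Bool) : PySem.Set Char × Bool :=
  if st.2 then st
  else
    let new := Z.foldl wcStep (PySem.Set.ofList st.1)
    if PySem.Set.equal new st.1 then (st.1, true) else (new, false)

def wcIter (Z : List (Char × Char)) (r : Char) (k : Nat) : PySem.Set Char × Bool :=
  (wcRound Z)^[k] ([r], false)

theorem wc_foldl_const_iterate {β γ : Type} (f : β → β) (l : List γ) (st : β) :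
    l.foldl (fun st _ => f st) st = f^[l.length] st := by
  induction l generalizing st with
  | nil => rfl
  | cons x t IHl => rw [List.foldl_cons, IHl, List.length_cons, Function.iterate_succ_apply]

theorem wcLoop_inv (Z : List (Char × Char)) (r : Char) (k : Nat) :
    (wcIter Z r k).1.Nodup ∧ r ∈ (wcIter Z r k).1 ∧
    (∀ x ∈ (wcIter Z r k).1, Relation.ReflTransGen (AdjZ Z) r x) ∧
    (∀ x ∈ (wcIter Z r k).1, x = r ∨ ∃ ab ∈ Z, x = ab.1 ∨ x = ab.2) ∧
    ((wcIter Z r k).2 = true →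
      ∀ x, x ∈ Z.foldl wcStep (PySem.Set.ofList (wcIter Z r k).1) ↔ x ∈ (wcIter Z r k).1) ∧
    ((wcIter Z r k).2 = false → k + 1 ≤ (wcIter Z r k).1.length) := by
  induction k with
  | zero =>
    refine ⟨List.nodup_singleton r, List.mem_singleton_self r, ?_, ?_, ?_, ?_⟩
    · intro x hx
      rw [List.mem_singleton.mp hx]
    · intro x hx
      exact Or.inl (List.mem_singleton.mp hx)
    · intro h; cases h
    · intro _; simp [wcIter]
  | succ k IHk =>
    obtain ⟨hnd, hr, hsound, hpool, hflag, hlen⟩ := IHk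
    have hit : wcIter Z r (k+1) = wcRound Z (wcIter Z r k) := by
      unfold wcIter
      rw [Function.iterate_succ_apply']
    set st := wcIter Z r k with hst
    rcases hb : st.2 with hb2 | hb2
    case true =>
      have hround : wcRound Z st = st := by unfold wcRound; rw [hb]; rfl
      rw [hit, hround]
      exact ⟨hnd, hr, hsound, hpool, hflag, by intro h; rw [h] at hb; cases hb⟩
    case false =>
      have hofl : PySem.Set.ofList st.1 = st.1 := PySem.Set.ofList_eq_self_of_nodup _ hnd
      have hround : wcRound Z st =
          (if PySem.Set.equal (Z.foldl wcStep (PySem.Set.ofList st.1)) st.1 then (st.1, true)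
           else (Z.foldl wcStep (PySem.Set.ofList st.1), false)) := by
        unfold wcRound
        rw [hb]
        simp only [Bool.false_eq_true, if_false]
      have hsub : ∀ x ∈ st.1, x ∈ Z.foldl wcStep (PySem.Set.ofList st.1) := by
        intro x hx
        exact wcStep_fold_mono (by rw [hofl]; exact hx)
      have hnewnd : (Z.foldl wcStep (PySem.Set.ofList st.1)).Nodup :=
        wcStep_fold_nodup (PySem.Set.nodup_ofList st.1)
      have hnewsound : ∀ x ∈ Z.foldl wcStep (PySem.Set.ofList st.1),
          Relation.ReflTransGen (AdjZ Z) r x := by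
        refine wcStep_fold_sound (fun ab h => h) ?_
        intro y hy
        exact hsound y (by rwa [hofl] at hy)
      have hnewpool : ∀ x ∈ Z.foldl wcStep (PySem.Set.ofList st.1),
          x = r ∨ ∃ ab ∈ Z, x = ab.1 ∨ x = ab.2 := by
        intro x hx
        rcases wcStep_fold_pool hx with h | h
        · exact hpool x (by rwa [hofl] at h)
        · exact Or.inr h
      by_cases heq : PySem.Set.equal (Z.foldl wcStep (PySem.Set.ofList st.1)) st.1 = true
      · rw [hit, hround, if_pos heq]
        refine ⟨hnd, hr, hsound, hpool, ?_, ?_⟩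
        · intro _
          exact fun x => (PySem.Set.equal_iff _ _).mp heq x
        · intro h; cases h
      · rw [hit, hround, if_neg heq]
        refine ⟨hnewnd, hsub r hr, hnewsound, hnewpool, ?_, ?_⟩
        · intro h; cases h
        · intro _
          have hlen1 : k + 1 ≤ st.1.length := hlen hb
          have hex : ∃ x, x ∈ Z.foldl wcStep (PySem.Set.ofList st.1) ∧ x ∉ st.1 := by
            by_contra hno
            push_neg at hno
            apply heq
            apply (PySem.Set.equal_iff _ _).mpr
            intro x
            exact ⟨fun hx => hno x hx, fun hx => hsub x hx⟩
          rcases hex with ⟨x, hx1, hx2⟩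
          have hss : st.1.toFinset ⊂ (Z.foldl wcStep (PySem.Set.ofList st.1)).toFinset := by
            constructor
            · intro y hy
              exact List.mem_toFinset.mpr (hsub y (List.mem_toFinset.mp hy))
            · intro hcon
              exact hx2 (List.mem_toFinset.mp (hcon (List.mem_toFinset.mpr hx1)))
          have hcard := Finset.card_lt_card hss
          rw [List.toFinset_card_of_nodup hnd, List.toFinset_card_of_nodup hnewnd] at hcard
          show k + 1 + 1 ≤ (List.foldl wcStep (PySem.Set.ofList st.1) Z).length
          omega
theorem wcLoop_closed (Z : List (Char × Char)) (r : Char) (K : Nat)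
    (hK : 2 * Z.length ≤ K) :
    ∀ ab ∈ Z, (ab.1 ∈ (wcIter Z r K).1 ∨ ab.2 ∈ (wcIter Z r K).1) →
      ab.1 ∈ (wcIter Z r K).1 ∧ ab.2 ∈ (wcIter Z r K).1 := by
  obtain ⟨hnd, hr, hsound, hpool, hflag, hlen⟩ := wcLoop_inv Z r K
  rcases hb : (wcIter Z r K).2 with _ | _
  case true =>
    intro ab hab hor
    have hofl : PySem.Set.ofList (wcIter Z r K).1 = (wcIter Z r K).1 :=
      PySem.Set.ofList_eq_self_of_nodup _ hnd
    have hor' : ab.1 ∈ PySem.Set.ofList (wcIter Z r K).1 ∨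
        ab.2 ∈ PySem.Set.ofList (wcIter Z r K).1 := by rwa [hofl]
    have hpr := wcStep_fold_processed hab hor'
    exact ⟨(hflag hb ab.1).mp hpr.1, (hflag hb ab.2).mp hpr.2⟩
  case false =>
    have hlen1 : K + 1 ≤ (wcIter Z r K).1.length := hlen hb
    have hsubpool : ∀ x ∈ (wcIter Z r K).1, x ∈ r :: (Z.map Prod.fst ++ Z.map Prod.snd) := by
      intro x hx
      rcases hpool x hx with h | ⟨ab, hab, h | h⟩
      · rw [h]; exact List.mem_cons_self
      · exact List.mem_cons_of_mem _ (List.mem_append_left _ (h ▸ List.mem_map_of_mem hab))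
      · exact List.mem_cons_of_mem _ (List.mem_append_right _ (h ▸ List.mem_map_of_mem hab))
    have hall : ∀ y ∈ r :: (Z.map Prod.fst ++ Z.map Prod.snd), y ∈ (wcIter Z r K).1 := by
      have hsubF : (wcIter Z r K).1.toFinset ⊆
          (r :: (Z.map Prod.fst ++ Z.map Prod.snd)).toFinset := by
        intro y hy
        exact List.mem_toFinset.mpr (hsubpool y (List.mem_toFinset.mp hy))
      have hcard : (r :: (Z.map Prod.fst ++ Z.map Prod.snd)).toFinset.card ≤
          (wcIter Z r K).1.toFinset.card := by
        have h1 : (r :: (Z.map Prod.fst ++ Z.map Prod.snd)).toFinset.card ≤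
            (r :: (Z.map Prod.fst ++ Z.map Prod.snd)).length := List.toFinset_card_le _
        have h2 : (r :: (Z.map Prod.fst ++ Z.map Prod.snd)).length = 2 * Z.length + 1 := by
          simp
          omega
        rw [List.toFinset_card_of_nodup hnd]
        omega
      have := Finset.eq_of_subset_of_card_le hsubF hcard
      intro y hy
      exact List.mem_toFinset.mp (this ▸ List.mem_toFinset.mpr hy)
    intro ab hab _
    constructor
    · exact hall _ (List.mem_cons_of_mem _ (List.mem_append_left _ (List.mem_map_of_mem hab)))
    · exact hall _ (List.mem_cons_of_mem _ (List.mem_append_right _ (List.mem_map_of_mem hab)))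

theorem wcLoop_complete (Z : List (Char × Char)) (r : Char) (K : Nat)
    (hK : 2 * Z.length ≤ K) :
    ∀ x, Relation.ReflTransGen (AdjZ Z) r x → x ∈ (wcIter Z r K).1 := by
  obtain ⟨hnd, hr, hsound, hpool, hflag, hlen⟩ := wcLoop_inv Z r K
  have hcl := wcLoop_closed Z r K hK
  intro x h
  induction h with
  | refl => exact hr
  | tail hxy hadj IH =>
    rcases hadj with ⟨ab, hab, ⟨h1, h2⟩ | ⟨h1, h2⟩⟩
    · exact h2 ▸ (hcl ab hab (Or.inl (h1 ▸ IH))).2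
    · exact h2 ▸ (hcl ab hab (Or.inr (h1 ▸ IH))).1

theorem wc_net_iff (ws : List String) :
    (((ws.map wcL).foldl (fun d b => d.insert b (d.getD b 0 - 1))
        ((ws.map wcF).foldl (fun d a => d.insert a (d.getD a 0 + 1))
          (PySem.Dict.empty : PySem.Dict Char Int))).values.any (fun v => v != 0)) = false ↔ WBalanced ws := by
  have hgetD : ∀ c : Char, ((ws.map wcL).foldl (fun d b => d.insert b (d.getD b 0 - 1))
      ((ws.map wcF).foldl (fun d a => d.insert a (d.getD a 0 + 1))
        (PySem.Dict.empty : PySem.Dict Char Int))).getD c 0 =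
      ((ws.map wcF).count c : Int) - ((ws.map wcL).count c : Int) := by
    intro c
    rw [wc_getD_foldl_insert_sub_one, PySem.Dict.getD_foldl_insert_add_one,
      PySem.Dict.getD_empty]
    ring
  have hnodup : ((ws.map wcL).foldl (fun d b => d.insert b (d.getD b 0 - 1))
      ((ws.map wcF).foldl (fun d a => d.insert a (d.getD a 0 + 1))
        (PySem.Dict.empty : PySem.Dict Char Int))).keys.Nodup := by
    apply PySem.Dict.nodup_keys_foldl_insert
    apply PySem.Dict.nodup_keys_foldl_insert
    exact PySem.Dict.nodup_keys_empty
  have hkeys : ∀ c : Char, c ∈ ((ws.map wcL).foldl (fun d b => d.insert b (d.getD b 0 - 1))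
      ((ws.map wcF).foldl (fun d a => d.insert a (d.getD a 0 + 1))
        (PySem.Dict.empty : PySem.Dict Char Int))).keys ↔ c ∈ ws.map wcF ∨ c ∈ ws.map wcL := by
    intro c
    rw [PySem.Dict.keys_foldl_insert, PySem.Set.mem_update,
      PySem.Dict.keys_foldl_insert, PySem.Set.mem_update, PySem.Dict.keys_empty]
    simp
  rw [PySem.Dict.values_eq_map_keys _ hnodup 0, List.any_map, List.any_eq_false]
  constructor
  · intro h c
    by_cases hc : c ∈ ws.map wcF ∨ c ∈ ws.map wcL
    · have := h c ((hkeys c).mpr hc)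
      simp only [Function.comp] at this
      rw [hgetD c] at this
      have hz : ((ws.map wcF).count c : Int) - ((ws.map wcL).count c : Int) = 0 := by
        by_contra hz
        exact this (bne_iff_ne.mpr hz)
      omega
    · push_neg at hc
      rw [List.count_eq_zero.mpr hc.1, List.count_eq_zero.mpr hc.2]
  · intro h c hc
    simp only [Function.comp]
    rw [hgetD c]
    have := h c
    intro hbne
    exact (bne_iff_ne.mp hbne) (by omega)

theorem wc_adjZ_iff (ws : List String) (a b : Char) :
    AdjZ ((ws.map wcF).zip (ws.map wcL)) a b ↔ AdjOf ws a b := by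
  unfold AdjZ AdjOf
  rw [List.zip_map']
  constructor
  · rintro ⟨ab, hab, h⟩
    rcases List.mem_map.mp hab with ⟨w, hw, rfl⟩
    exact ⟨w, hw, h⟩
  · rintro ⟨w, hw, h⟩
    exact ⟨(wcF w, wcL w), List.mem_map_of_mem hw, h⟩

theorem wc_port_loop_eq (Z : List (Char × Char)) (l : List Int)
    (init : PySem.Set Char × Bool) :
    l.foldl (fun (st : PySem.Set Char × Bool) _ =>
      if st.2 then st
      else
        let new : PySem.Set Char :=
          Z.foldl (fun nw ab =>
            if PySem.Set.contains nw ab.1 || PySem.Set.contains nw ab.2 then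
              PySem.Set.add (PySem.Set.add nw ab.1) ab.2
            else nw) (PySem.Set.ofList st.1)
        if PySem.Set.equal new st.1 then (st.1, true) else (new, false)) init
    = (wcRound Z)^[l.length] init := by
  rw [← wc_foldl_const_iterate]
  rfl

theorem wc_alt_iff (ws : List String) (h2 : 2 ≤ ws.length) :
    word_circle_alt ws = true ↔ (WBalanced ws ∧ ConnTo ws (StartC ws)) := by
  have hnlt : ¬ (PySem.List.len ws < 2) := by
    rw [PySem.List.len_eq]
    push_cast
    omega
  simp only [word_circle_alt]
  rw [if_neg hnlt]
  have hF : ws.map (fun w => (PySem.Str.pyGet? w 0).getD ' ') = ws.map wcF := rfl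
  have hL : ws.map (fun w => (PySem.Str.pyGet? w (-1)).getD ' ') = ws.map wcL := rfl
  rw [hF, hL]
  by_cases hbal : WBalanced ws
  · have hany := (wc_net_iff ws).mpr hbal
    rw [if_neg (by rw [hany]; exact Bool.false_ne_true)]
    rw [wc_port_loop_eq]
    have hlen : (PySem.List.pyRange 0 (2 * PySem.List.len ws) 1).length = 2 * ws.length := by
      rw [PySem.List.length_pyRange_one]
      rw [PySem.List.len_eq]
      have : (2 * (ws.length : Int) - 0) = ((2 * ws.length : Nat) : Int) := by push_cast; ring
      rw [this, Int.toNat_natCast]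
    have hinit : (PySem.Set.add PySem.Set.empty (PySem.List.pyGetD (ws.map wcF) 0 ' '), false)
        = (([StartC ws] : PySem.Set Char), false) := by
      have h1 : PySem.List.pyGetD (ws.map wcF) 0 ' ' = StartC ws := by
        rw [PySem.List.pyGetD_zero]; rfl
      rw [h1]
      rfl
    rw [hlen, hinit]
    have hiter : (wcRound ((ws.map wcF).zip (ws.map wcL)))^[2 * ws.length]
        (([StartC ws] : PySem.Set Char), false)
        = wcIter ((ws.map wcF).zip (ws.map wcL)) (StartC ws) (2 * ws.length) := rfl
    rw [hiter]
    have hK : 2 * ((ws.map wcF).zip (ws.map wcL)).length ≤ 2 * ws.length := by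
      rw [List.length_zip, List.length_map, List.length_map, Nat.min_self]
    constructor
    · intro h
      refine ⟨hbal, ?_⟩
      intro w hw
      have hmem : wcF w ∈ ws.map wcF := List.mem_map_of_mem hw
      have hcont := List.all_eq_true.mp h _ hmem
      have hx : wcF w ∈ (wcIter ((ws.map wcF).zip (ws.map wcL)) (StartC ws) (2 * ws.length)).1 :=
        (PySem.Set.contains_iff _ _).mp hcont
      obtain ⟨_, _, hsound, _, _, _⟩ := wcLoop_inv ((ws.map wcF).zip (ws.map wcL)) (StartC ws)
        (2 * ws.length)
      exact (hsound _ hx).mono (fun x y hxy => (wc_adjZ_iff ws x y).mp hxy)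
    · rintro ⟨_, hconn⟩
      apply List.all_eq_true.mpr
      intro a ha
      rcases List.mem_map.mp ha with ⟨w, hw, rfl⟩
      have hrtg : Relation.ReflTransGen (AdjZ ((ws.map wcF).zip (ws.map wcL)))
          (StartC ws) (wcF w) :=
        (hconn w hw).mono (fun x y hxy => (wc_adjZ_iff ws x y).mpr hxy)
      exact (PySem.Set.contains_iff _ _).mpr
        (wcLoop_complete ((ws.map wcF).zip (ws.map wcL)) (StartC ws) (2 * ws.length) hK _ hrtg)
  · have hany : (((ws.map wcL).foldl (fun d b => d.insert b (d.getD b 0 - 1))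
        ((ws.map wcF).foldl (fun d a => d.insert a (d.getD a 0 + 1))
          (PySem.Dict.empty : PySem.Dict Char Int))).values.any (fun v => v != 0)) = true := by
      rcases hb : (((ws.map wcL).foldl (fun d b => d.insert b (d.getD b 0 - 1))
          ((ws.map wcF).foldl (fun d a => d.insert a (d.getD a 0 + 1))
            (PySem.Dict.empty : PySem.Dict Char Int))).values.any (fun v => v != 0)) with _ | _
      · exact absurd ((wc_net_iff ws).mp hb) hbal
      · exact hb
    rw [if_pos hany]
    simp only [Bool.false_eq_true, false_iff]
    rintro ⟨hb, _⟩
    exact hbal hb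

-- ---------- Euler's theorem on the letter graph ----------
-- closed trail: nonempty chain starting with letter r and ending with letter r
def CTrail (r : Char) (l : List String) : Prop :=
  List.IsChain RW l ∧ l.head?.map wcF = some r ∧ l.getLast?.map wcL = some r

theorem wc_trail_map_lch : ∀ (l : List String), List.IsChain RW l → ∀ (hne : l ≠ []),
    l.map wcL = (l.map wcF).tail ++ [wcL (l.getLast hne)] := by
  intro l
  induction l with
  | nil => intro _ hne; exact absurd rfl hne
  | cons a t IHl =>
    intro hch _
    cases t with
    | nil => simp
    | cons b t' =>
      have hr : RW a b := (List.isChain_cons_cons.mp hch).1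
      have hch' : List.IsChain RW (b :: t') := (List.isChain_cons_cons.mp hch).2
      have hIH := IHl hch' (by simp)
      have hlast : (a :: b :: t').getLast (by simp) = (b :: t').getLast (by simp) := by
        rw [List.getLast_cons]
      rw [List.map_cons, hIH, hlast]
      have hh : wcL a = wcF b := hr
      simp [hh]

theorem wc_count_singleton (c x : Char) : List.count c [x] = if c = x then 1 else 0 := by
  rcases eq_or_ne c x with rfl | hne
  · simp
  · simp [hne, Ne.symm hne]

theorem wc_trail_count (l : List String) (r v : Char) (hch : List.IsChain RW l)
    (hhead : l.head?.map wcF = some r) (hlast : l.getLast?.map wcL = some v) (c : Char) :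
    ((l.map wcF).count c : Int) - ((l.map wcL).count c : Int) =
      (if c = r then 1 else 0) - (if c = v then 1 else 0) := by
  obtain ⟨a, t, rfl⟩ : ∃ a t, l = a :: t := by
    cases l with
    | nil => simp at hhead
    | cons a t => exact ⟨a, t, rfl⟩
  have hne : (a :: t) ≠ [] := by simp
  have h1 : (a :: t).map wcL = ((a :: t).map wcF).tail ++ [wcL ((a :: t).getLast hne)] :=
    wc_trail_map_lch _ hch hne
  have hv : wcL ((a :: t).getLast hne) = v := by
    rw [List.getLast?_eq_some_getLast hne] at hlast
    simpa using hlast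
  have hr : wcF a = r := by simpa using hhead
  rw [h1, hv]
  simp only [List.map_cons, List.tail_cons]
  rw [List.count_cons, List.count_append, hr, wc_count_singleton]
  simp only [beq_iff_eq]
  split_ifs <;> push_cast <;> first
    | omega
    | simp_all

theorem wc_ctrail_balanced {r : Char} {l : List String} (h : CTrail r l) : WBalanced l := by
  intro c
  have := wc_trail_count l r r h.1 h.2.1 h.2.2 c
  omega

theorem wc_balanced_perm {l ws : List String} (hp : l.Perm ws) (h : WBalanced l) :
    WBalanced ws := by
  intro c
  rw [← (hp.map wcF).count_eq, ← (hp.map wcL).count_eq]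
  exact h c

theorem wc_balanced_sub {E C Rest : List String} (hp : E.Perm (C ++ Rest))
    (hE : WBalanced E) (hC : WBalanced C) : WBalanced Rest := by
  intro c
  have h1 := wc_balanced_perm hp hE c
  rw [List.map_append, List.map_append, List.count_append, List.count_append] at h1
  have h2 := hC c
  omega

-- every letter along a chain is reachable from the first letter
theorem wc_chain_conn (ws : List String) : ∀ (l : List String), List.IsChain RW l →
    (∀ w ∈ l, w ∈ ws) → ∀ a t, l = a :: t →
    ∀ w ∈ l, Relation.ReflTransGen (AdjOf ws) (wcF a) (wcF w) := by
  intro l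
  induction l with
  | nil => intro _ _ a t h; cases h
  | cons x l' IHl =>
    intro hch hsub a t heq w hw
    have hax : x = a := by cases heq; rfl
    subst hax
    rcases List.mem_cons.mp hw with rfl | hw'
    · exact Relation.ReflTransGen.refl
    · cases l' with
      | nil => cases hw'
      | cons b t' =>
        have hr : RW x b := (List.isChain_cons_cons.mp hch).1
        have hadj : AdjOf ws (wcF x) (wcF b) :=
          ⟨x, hsub x List.mem_cons_self, Or.inl ⟨rfl, hr⟩⟩
        have hIH := IHl (List.isChain_cons_cons.mp hch).2
          (fun u hu => hsub u (List.mem_cons_of_mem _ hu)) b t' rfl w hw'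
        exact Relation.ReflTransGen.trans (Relation.ReflTransGen.single hadj) hIH

def endV (v : Char) (T : List String) : Char :=
  match T.getLast? with
  | none => v
  | some w => wcL w

theorem endV_cons (v : Char) (w : String) (T : List String) :
    endV v (w :: T) = endV (wcL w) T := by
  cases T with
  | nil => rfl
  | cons b t =>
    unfold endV
    rw [List.getLast?_cons_cons, List.getLast?_eq_some_getLast (l := b :: t) (by simp)]

theorem endV_ne_nil (v : Char) (T : List String) (h : T ≠ []) :
    endV v T = wcL (T.getLast h) := by
  unfold endV
  rw [List.getLast?_eq_some_getLast h]

theorem wc_greedy : ∀ (n : Nat) (E : List String), E.length = n → ∀ v : Char,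
    ∃ T Rest, E.Perm (T ++ Rest) ∧ List.IsChain RW T ∧
      (T = [] ∨ T.head?.map wcF = some v) ∧
      (∀ w ∈ Rest, wcF w ≠ endV v T) := by
  intro n
  induction n using Nat.strong_induction_on with
  | _ n IH =>
    intro E hn v
    by_cases hex : ∃ w ∈ E, wcF w = v
    · obtain ⟨w, hw, hfw⟩ := hex
      have hlt : E.length - 1 < n := by
        have : 1 ≤ E.length := List.length_pos_of_mem hw
        omega
      have hlene : (E.erase w).length = E.length - 1 := List.length_erase_of_mem hw
      obtain ⟨T', Rest', hperm', hch', hhd', hmax'⟩ :=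
        IH (E.length - 1) (by omega) (E.erase w) hlene (wcL w)
      refine ⟨w :: T', Rest', ?_, ?_, ?_, ?_⟩
      · exact (List.perm_cons_erase hw).trans (hperm'.cons w)
      · rw [List.isChain_cons']
        refine ⟨?_, hch'⟩
        intro b hb
        rcases hhd' with h | h
        · subst h; simp at hb
        · have : T' ≠ [] := by
            intro hT; subst hT; simp at h
          rw [List.head?_eq_some_head this] at hb h
          simp only [Option.map_some, Option.some.injEq] at h
          have hb' : T'.head this = b := by simpa using hb
          show RW w b
          rw [← hb']
          exact h.symm
      · right; simp [hfw]
      · intro w' hw'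
        rw [endV_cons]
        exact hmax' w' hw'
    · refine ⟨[], E, by simpa using List.Perm.refl E, by simp, Or.inl rfl, ?_⟩
      intro w hw
      unfold endV
      simp only [List.getLast?_nil]
      intro hc
      exact hex ⟨w, hw, hc⟩

theorem wc_mem_of_count_map_pos {f : String → Char} {E : List String} {c : Char}
    (h : 0 < (E.map f).count c) : ∃ w ∈ E, f w = c := by
  have := List.count_pos_iff.mp h
  rcases List.mem_map.mp this with ⟨w, hw, hfw⟩
  exact ⟨w, hw, hfw⟩

theorem wc_exists_out {E : List String} {r : Char} (hbal : WBalanced E)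
    (h : ∃ w ∈ E, wcF w = r ∨ wcL w = r) : ∃ w ∈ E, wcF w = r := by
  obtain ⟨w, hw, hor⟩ := h
  rcases hor with hf | hl
  · exact ⟨w, hw, hf⟩
  · apply wc_mem_of_count_map_pos
    rw [hbal r]
    apply List.count_pos_iff.mpr
    exact List.mem_map.mpr ⟨w, hw, hl⟩

theorem wc_maximal_closed {E T Rest : List String} {r : Char} (hbal : WBalanced E)
    (hperm : E.Perm (T ++ Rest)) (hch : List.IsChain RW T)
    (hhead : T.head?.map wcF = some r) (hmax : ∀ w ∈ Rest, wcF w ≠ endV r T) :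
    T.getLast?.map wcL = some r := by
  have hne : T ≠ [] := by
    intro h; subst h; simp at hhead
  set v := wcL (T.getLast hne) with hv
  have hlast : T.getLast?.map wcL = some v := by
    rw [List.getLast?_eq_some_getLast hne]; rfl
  rcases eq_or_ne v r with h | h
  · rw [hlast, h]
  · exfalso
    have hcount := wc_trail_count T r v hch hhead hlast v
    have hbalv := wc_balanced_perm hperm hbal v
    rw [List.map_append, List.map_append, List.count_append, List.count_append] at hbalv
    have hRest : 0 < (Rest.map wcF).count v := by
      rw [if_neg h, if_pos rfl] at hcount
      omega
    obtain ⟨w, hw, hfw⟩ := wc_mem_of_count_map_pos hRest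
    apply hmax w hw
    rw [endV_ne_nil r T hne, hfw]

theorem wc_fch_mem_verts : ∀ (T : List String) (r : Char), List.IsChain RW T →
    T.head?.map wcF = some r → ∀ w ∈ T, wcF w ∈ r :: T.map wcL := by
  intro T
  induction T with
  | nil => intro r _ _ w hw; cases hw
  | cons a t IHT =>
    intro r hch hhead w hw
    have hra : wcF a = r := by simpa using hhead
    rcases List.mem_cons.mp hw with rfl | hw'
    · rw [hra]; exact List.mem_cons_self
    · cases t with
      | nil => cases hw'
      | cons b t' =>
        have hr : RW a b := (List.isChain_cons_cons.mp hch).1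
        have hIH := IHT (wcF b) (List.isChain_cons_cons.mp hch).2 (by simp) w hw'
        rcases List.mem_cons.mp hIH with h | h
        · rw [h, ← hr]
          exact List.mem_cons_of_mem _ (List.mem_map_of_mem List.mem_cons_self)
        · exact List.mem_cons_of_mem _ (by
            rw [List.map_cons]
            exact List.mem_cons_of_mem _ h)

theorem wc_splice {C D : List String} {r v : Char} (hC : CTrail r C) (hD : CTrail v D)
    (hv : v = r ∨ v ∈ C.map wcL) : ∃ C', C'.Perm (C ++ D) ∧ CTrail r C' := by
  obtain ⟨hCch, hChd, hClast⟩ := hC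
  obtain ⟨hDch, hDhd, hDlast⟩ := hD
  have hCne : C ≠ [] := by intro h; subst h; simp at hChd
  have hDne : D ≠ [] := by intro h; subst h; simp at hDhd
  have hDhd' : wcF (D.head hDne) = v := by
    rw [List.head?_eq_some_head hDne] at hDhd; simpa using hDhd
  have hDlast' : wcL (D.getLast hDne) = v := by
    rw [List.getLast?_eq_some_getLast hDne] at hDlast; simpa using hDlast
  rcases hv with rfl | hvC
  · -- v = r : prepend the circuit
    refine ⟨D ++ C, List.perm_append_comm, ?_, ?_, ?_⟩
    · rw [List.isChain_append]
      refine ⟨hDch, hCch, ?_⟩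
      intro x hx y hy
      rw [List.getLast?_eq_some_getLast hDne] at hx
      rw [List.head?_eq_some_head hCne] at hy
      simp only [Option.mem_def, Option.some.injEq] at hx hy
      have hy' : wcF (C.head hCne) = v := by
        rw [List.head?_eq_some_head hCne] at hChd; simpa using hChd
      show wcL x = wcF y
      rw [← hx, ← hy, hDlast', hy']
    · rw [List.head?_append, List.head?_eq_some_head hDne]
      simpa using hDhd'
    · rw [List.getLast?_append, List.getLast?_eq_some_getLast hCne]
      rw [List.getLast?_eq_some_getLast hCne] at hClast
      simpa using hClast
  · -- v = wcL w for some w in C : insert D after w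
    rcases List.mem_map.mp hvC with ⟨w, hwC, hwv⟩
    rcases List.append_of_mem hwC with ⟨X, Y, rfl⟩
    have hCeq : X ++ w :: Y = (X ++ [w]) ++ Y := by simp
    rw [hCeq] at hCch hChd hClast
    obtain ⟨h1, h2, h3⟩ := List.isChain_append.mp hCch
    have hXw_last : (X ++ [w]).getLast? = some w := by
      rw [List.getLast?_append]; rfl
    have hXw_ne : X ++ [w] ≠ [] := by simp
    refine ⟨(X ++ [w]) ++ (D ++ Y), ?_, ?_, ?_, ?_⟩
    · rw [hCeq]
      refine (List.Perm.append_left (X ++ [w]) List.perm_append_comm).trans ?_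
      simp only [← List.append_assoc]
      exact List.Perm.refl _
    · rw [List.isChain_append]
      refine ⟨h1, ?_, ?_⟩
      · rw [List.isChain_append]
        refine ⟨hDch, h2, ?_⟩
        intro x hx y hy
        have hx' : x = D.getLast hDne := by
          rw [List.getLast?_eq_some_getLast hDne] at hx
          exact (Option.some.inj (Option.mem_def.mp hx)).symm
        have h3' := h3 w (by rw [hXw_last]; rfl) y hy
        show wcL x = wcF y
        rw [hx', hDlast', ← hwv]
        exact h3'
      · intro x hx y hy
        have hx' : x = w := by
          rw [hXw_last] at hx
          exact (Option.some.inj (Option.mem_def.mp hx)).symm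
        have hy' : y = D.head hDne := by
          rw [List.head?_append, List.head?_eq_some_head hDne, Option.some_or] at hy
          exact (Option.some.inj (Option.mem_def.mp hy)).symm
        show wcL x = wcF y
        rw [hx', hy', hDhd', hwv]
    · rw [List.head?_append, List.head?_eq_some_head hXw_ne, Option.some_or]
      rw [List.head?_append, List.head?_eq_some_head hXw_ne, Option.some_or] at hChd
      exact hChd
    · rw [List.getLast?_append, List.getLast?_append]
      rw [List.getLast?_append] at hClast
      cases hY : Y.getLast? with
      | none =>
        rw [hY] at hClast
        rw [Option.none_or, hXw_last] at hClast
        rw [Option.none_or, List.getLast?_eq_some_getLast hDne, Option.some_or]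
        simp only [Option.map_some, Option.some.injEq]
        rw [hDlast', ← hwv]
        simpa using hClast
      | some q =>
        rw [hY] at hClast
        rw [Option.some_or] at hClast
        rw [Option.some_or, Option.some_or]
        exact hClast

theorem wc_first_on_C {E C Rest : List String} {r : Char} (hperm : E.Perm (C ++ Rest))
    (hC : CTrail r C) (hconn : ∀ w ∈ Rest, Relation.ReflTransGen (AdjOf E) r (wcF w))
    {g0 : String} (hg0 : g0 ∈ Rest) :
    ∃ g ∈ Rest, ∃ v, (wcF g = v ∨ wcL g = v) ∧ (v = r ∨ v ∈ C.map wcL) := by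
  have hsymm := Relation.ReflTransGen.symmetric (adjOf_symm E)
  have hrtg : Relation.ReflTransGen (AdjOf E) (wcF g0) r := hsymm (hconn g0 hg0)
  suffices H : ∀ x, Relation.ReflTransGen (AdjOf E) x r →
      ((x = r ∨ x ∈ C.map wcL) ∨
        ∃ g ∈ Rest, ∃ v, (wcF g = v ∨ wcL g = v) ∧ (v = r ∨ v ∈ C.map wcL)) by
    rcases H (wcF g0) hrtg with h | h
    · exact ⟨g0, hg0, wcF g0, Or.inl rfl, h⟩
    · exact h
  intro x hx
  induction hx using Relation.ReflTransGen.head_induction_on with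
  | refl => exact Or.inl (Or.inl rfl)
  | @head a c hadj htail IHx =>
    rcases IHx with hcV | hres
    · obtain ⟨e, he, hor⟩ := hadj
      have heCR : e ∈ C ++ Rest := hperm.mem_iff.mp he
      rcases List.mem_append.mp heCR with heC | heRest
      · -- both endpoints of an edge of C are vertices of C
        left
        have hfch := wc_fch_mem_verts C r hC.1 hC.2.1 e heC
        have hlch : wcL e ∈ C.map wcL := List.mem_map_of_mem heC
        rcases hor with ⟨h1, _⟩ | ⟨h1, _⟩
        · rw [← h1]
          rcases List.mem_cons.mp hfch with h | h
          · exact Or.inl h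
          · exact Or.inr h
        · rw [← h1]
          exact Or.inr hlch
      · -- an edge of Rest touching a vertex of C
        right
        rcases hor with ⟨_, h2⟩ | ⟨_, h2⟩
        · exact ⟨e, heRest, c, Or.inr h2, hcV⟩
        · exact ⟨e, heRest, c, Or.inl h2, hcV⟩
    · exact Or.inr hres

theorem wc_euler_main : ∀ (n : Nat) (E : List String), E.length = n → ∀ r : Char,
    WBalanced E → (∀ w ∈ E, Relation.ReflTransGen (AdjOf E) r (wcF w)) →
    (∃ w ∈ E, wcF w = r ∨ wcL w = r) →
    ∃ l, l.Perm E ∧ CTrail r l := by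
  intro n
  induction n using Nat.strong_induction_on with
  | _ n IH =>
    intro E hn r hbal hconn hinc
    classical
    obtain ⟨w1, hw1, hfw1⟩ := wc_exists_out hbal hinc
    obtain ⟨T, Rest0, hperm0, hchT, hhdT, hmaxT⟩ := wc_greedy n E hn r
    have hTne : T ≠ [] := by
      intro hT; subst hT
      have hmem : w1 ∈ Rest0 := by
        have := hperm0.mem_iff.mp hw1
        simpa using this
      exact hmaxT w1 hmem (by rw [hfw1]; rfl)
    have hhdT' : T.head?.map wcF = some r := by
      rcases hhdT with h | h
      · exact absurd h hTne
      · exact h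
    have hlastT := wc_maximal_closed hbal hperm0 hchT hhdT' hmaxT
    have hCT : CTrail r T := ⟨hchT, hhdT', hlastT⟩
    -- repeatedly absorb the remaining edges into the closed trail
    have habs : ∀ (m : Nat) (C Rest : List String), Rest.length = m → E.Perm (C ++ Rest) →
        CTrail r C → (∀ w ∈ Rest, Relation.ReflTransGen (AdjOf E) r (wcF w)) →
        WBalanced Rest → ∃ l, l.Perm E ∧ CTrail r l := by
      intro m
      induction m using Nat.strong_induction_on with
      | _ m IHm =>
        intro C Rest hm hpermCR hCC hconnR hbalR
        rcases eq_or_ne Rest [] with hRe | hRe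
        · subst hRe
          exact ⟨C, by simpa using hpermCR.symm, hCC⟩
        · obtain ⟨g0, hg0⟩ := List.exists_mem_of_ne_nil Rest hRe
          obtain ⟨g, hgR, v, hgv, hvC⟩ := wc_first_on_C hpermCR hCC hconnR hg0
          have hCne : C ≠ [] := by
            intro h; subst h; simp [CTrail] at hCC
          -- the weak component of v inside Rest
          have hA : ∀ e ∈ Rest, ∀ x, Relation.ReflTransGen (AdjOf Rest) v x →
              (wcF e = x ∨ wcL e = x) →
              e ∈ Rest.filter (fun w =>
                decide (Relation.ReflTransGen (AdjOf Rest) v (wcF w))) := by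
            intro e he x hx hor
            refine List.mem_filter.mpr ⟨he, decide_eq_true ?_⟩
            rcases hor with h | h
            · exact h ▸ hx
            · exact hx.tail ⟨e, he, Or.inr ⟨h, rfl⟩⟩
          set F := Rest.filter (fun w =>
            decide (Relation.ReflTransGen (AdjOf Rest) v (wcF w))) with hFdef
          set G := Rest.filter (fun w =>
            !decide (Relation.ReflTransGen (AdjOf Rest) v (wcF w))) with hGdef
          have hsplit : (F ++ G).Perm Rest := List.filter_append_perm _ _
          have hFmem : ∀ w, w ∈ F ↔
              (w ∈ Rest ∧ Relation.ReflTransGen (AdjOf Rest) v (wcF w)) := by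
            intro w
            rw [hFdef, List.mem_filter, decide_eq_true_eq]
          have hGmem : ∀ w, w ∈ G ↔
              (w ∈ Rest ∧ ¬ Relation.ReflTransGen (AdjOf Rest) v (wcF w)) := by
            intro w
            rw [hGdef, List.mem_filter, Bool.not_eq_eq_eq_not, Bool.not_true,
              decide_eq_false_iff_not]
          have hgF : g ∈ F := hA g hgR v Relation.ReflTransGen.refl hgv
          -- connectivity inside the component
          have hBgen : ∀ x, Relation.ReflTransGen (AdjOf Rest) v x →
              Relation.ReflTransGen (AdjOf F) v x := by
            intro x hx
            induction hx with
            | refl => exact Relation.ReflTransGen.refl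
            | @tail b c h1 h2 IHb =>
              obtain ⟨e, he, hor⟩ := h2
              have heF : e ∈ F := by
                rcases hor with ⟨h3, h4⟩ | ⟨h3, h4⟩
                · exact hA e he b h1 (Or.inl h3)
                · exact hA e he b h1 (Or.inr h3)
              exact IHb.tail ⟨e, heF, hor⟩
          have hBF : ∀ w ∈ F, Relation.ReflTransGen (AdjOf F) v (wcF w) :=
            fun w hw => hBgen _ ((hFmem w).mp hw).2
          -- counts split along the component
          have hcount : ∀ (f : String → Char) (c : Char),
              (F.map f).count c + (G.map f).count c = (Rest.map f).count c := by
            intro f c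
            have := (hsplit.map f).count_eq c
            rw [List.map_append, List.count_append] at this
            exact this
          -- per-letter balance of the two parts
          have hFG : ∀ c : Char, (F.map wcF).count c = (F.map wcL).count c ∧
              (G.map wcF).count c = (G.map wcL).count c := by
            intro c
            by_cases hcF : ∃ f ∈ F, wcF f = c ∨ wcL f = c
            · obtain ⟨f, hf, hforl⟩ := hcF
              have hreach : Relation.ReflTransGen (AdjOf Rest) v c := by
                have h1 := ((hFmem f).mp hf).2
                have hfR := ((hFmem f).mp hf).1
                rcases hforl with h | h
                · exact h ▸ h1
                · exact h ▸ h1.tail ⟨f, hfR, Or.inl ⟨rfl, rfl⟩⟩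
              have hGf : (G.map wcF).count c = 0 := by
                rw [List.count_eq_zero]
                intro hmem
                rcases List.mem_map.mp hmem with ⟨g', hg', hgc⟩
                have hgF' := hA g' ((hGmem g').mp hg').1 c hreach (Or.inl hgc)
                exact ((hGmem g').mp hg').2 ((hFmem g').mp hgF').2
              have hGl : (G.map wcL).count c = 0 := by
                rw [List.count_eq_zero]
                intro hmem
                rcases List.mem_map.mp hmem with ⟨g', hg', hgc⟩
                have hgF' := hA g' ((hGmem g').mp hg').1 c hreach (Or.inr hgc)
                exact ((hGmem g').mp hg').2 ((hFmem g').mp hgF').2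
              have h1 := hcount wcF c
              have h2 := hcount wcL c
              have h3 := hbalR c
              constructor <;> omega
            · push_neg at hcF
              have hFf : (F.map wcF).count c = 0 := by
                rw [List.count_eq_zero]
                intro hmem
                rcases List.mem_map.mp hmem with ⟨f, hf, hfc⟩
                exact (hcF f hf).1 hfc
              have hFl : (F.map wcL).count c = 0 := by
                rw [List.count_eq_zero]
                intro hmem
                rcases List.mem_map.mp hmem with ⟨f, hf, hfc⟩
                exact (hcF f hf).2 hfc
              have h1 := hcount wcF c
              have h2 := hcount wcL c
              have h3 := hbalR c
              constructor <;> omega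
          -- Euler circuit of the component, by the outer induction
          have hlenF : F.length < n := by
            have h1 : F.length ≤ Rest.length := List.length_filter_le _ _
            have h2 : E.length = C.length + Rest.length := by
              rw [hpermCR.length_eq, List.length_append]
            have h3 : 1 ≤ C.length := List.length_pos_of_ne_nil hCne
            omega
          obtain ⟨D, hDperm, hDC⟩ := IH F.length hlenF F rfl v (fun c => (hFG c).1) hBF
            ⟨g, hgF, hgv⟩
          -- splice it into the closed trail
          obtain ⟨C2, hC2perm, hC2⟩ := wc_splice hCC hDC hvC
          -- and recurse on what is left
          have hFne : F ≠ [] := List.ne_nil_of_mem hgF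
          have hlenG : G.length < m := by
            have h1 : F.length + G.length = Rest.length := by
              have := hsplit.length_eq
              rw [List.length_append] at this
              exact this
            have h2 : 1 ≤ F.length := List.length_pos_of_ne_nil hFne
            omega
          have hpermE2 : E.Perm (C2 ++ G) := by
            have h1 : E.Perm (C ++ (F ++ G)) :=
              hpermCR.trans (List.Perm.append_left C hsplit.symm)
            have h2 : C2.Perm (C ++ F) :=
              hC2perm.trans (List.Perm.append_left C hDperm)
            have h3 : (C ++ (F ++ G)).Perm ((C ++ F) ++ G) := by
              simp only [← List.append_assoc]
              exact List.Perm.refl _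
            exact (h1.trans h3).trans (List.Perm.append_right G h2.symm)
          exact IHm G.length hlenG C2 G rfl hpermE2 hC2
            (fun w hw => hconnR w ((hGmem w).mp hw).1) (fun c => (hFG c).2)
    exact habs Rest0.length T Rest0 rfl hperm0 hCT
      (fun w hw => hconn w (hperm0.mem_iff.mpr (List.mem_append_right T hw)))
      (wc_balanced_sub hperm0 hbal (wc_ctrail_balanced hCT))

theorem wc_euler_iff (ws : List String) (h2 : 2 ≤ ws.length) :
    CanCircle ws ↔ (WBalanced ws ∧ ConnTo ws (StartC ws)) := by
  obtain ⟨w0, t0, rfl⟩ : ∃ w0 t0, ws = w0 :: t0 := by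
    cases ws with
    | nil => simp at h2
    | cons a t => exact ⟨a, t, rfl⟩
  have hstart : StartC (w0 :: t0) = wcF w0 := rfl
  constructor
  · rintro ⟨l, hperm, hch, hlen, hclose⟩
    have hlne : l ≠ [] := by
      intro h; subst h; simp at hlen
    obtain ⟨a, t, rfl⟩ : ∃ a t, l = a :: t := by
      cases l with
      | nil => exact absurd rfl hlne
      | cons a t => exact ⟨a, t, rfl⟩
    have hheadF : (a :: t).head?.map wcF = some (wcF a) := by simp
    have hct : CTrail (wcF a) (a :: t) := by
      refine ⟨hch, hheadF, ?_⟩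
      rw [hclose, hheadF]
    constructor
    · exact wc_balanced_perm hperm (wc_ctrail_balanced hct)
    · -- connectivity
      have hsub : ∀ w ∈ a :: t, w ∈ w0 :: t0 := fun w hw => hperm.mem_iff.mp hw
      have hconn := wc_chain_conn (w0 :: t0) (a :: t) hch hsub a t rfl
      have hw0 : w0 ∈ a :: t := hperm.mem_iff.mpr List.mem_cons_self
      have h1 : Relation.ReflTransGen (AdjOf (w0 :: t0)) (wcF a) (wcF w0) := hconn w0 hw0
      have hsymm : Symmetric (Relation.ReflTransGen (AdjOf (w0 :: t0))) :=
        Relation.ReflTransGen.symmetric (adjOf_symm _)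
      intro w hw
      rw [hstart]
      have h2' : Relation.ReflTransGen (AdjOf (w0 :: t0)) (wcF a) (wcF w) := by
        have : w ∈ a :: t := hperm.mem_iff.mpr hw
        exact hconn w this
      exact Relation.ReflTransGen.trans (hsymm h1) h2'
  · rintro ⟨hbal, hconn⟩
    have hinc : ∃ w ∈ w0 :: t0, wcF w = StartC (w0 :: t0) ∨ wcL w = StartC (w0 :: t0) := by
      exact ⟨w0, List.mem_cons_self, Or.inl hstart.symm⟩
    obtain ⟨l, hperm, hch, hhead, hlast⟩ :=
      wc_euler_main (w0 :: t0).length (w0 :: t0) rfl (StartC (w0 :: t0)) hbal hconn hinc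
    refine ⟨l, hperm, hch, ?_, ?_⟩
    · rw [hperm.length_eq]; exact h2
    · rw [hhead, hlast]

theorem word_circle_iff (ws : List String) : word_circle ws = true ↔ CanCircle ws := by
  unfold word_circle CanCircle
  rw [wc_bt_iff ws.length ws rfl [] (by simp)]
  simp


-- ===== VERDICT (by name: the statement is the Claim_ definition above) =====
theorem word_circle_spec : Claim_equal_word_circle := by
  intro words _ _
  unfold Spec_word_circle
  by_cases h2 : 2 ≤ words.length
  · rw [Bool.eq_iff_iff, word_circle_iff, wc_euler_iff words h2, ← wc_alt_iff words h2]
  · have hlt : words.length < 2 := by omega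
    have halt : word_circle_alt words = false := by
      simp only [word_circle_alt]
      rw [if_pos (by rw [PySem.List.len_eq]; exact_mod_cast hlt)]
    have hA : word_circle words = false := by
      rcases hb : word_circle words with _ | _
      · rfl
      · exfalso
        obtain ⟨l, hl, _, hlen, _⟩ := (word_circle_iff words).mp hb
        rw [hl.length_eq] at hlen
        omega
    rw [hA, halt]
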